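-- pv_equiv track=rewrite | github.com/azimali322/Yahtzee | game_logic.py | _calculate_straight
-- ===== SOURCE A (Python) =====
-- def _calculate_straight(dice_values, required_length):
--     """Helper to calculate score for Small or Large Straight."""
--     unique_dice = sorted(list(set(dice_values)))
--     if len(unique_dice) < required_length:
--         return 0
--
--     # Check all possible sub-sequences of required_length
--     for i in range(len(unique_dice) - required_length + 1):
--         is_straight = True
--         for j in range(required_length - 1):
--             if unique_dice[i+j+1] - unique_dice[i+j] != 1:
--                 is_straight = False
--                 break
--         if is_straight:
--             if required_length == 4: return 30 # Small Straight
--             if required_length == 5: return 40 # Large Straight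
--     return 0
-- ===== SOURCE B (Python) =====
-- def _calculate_straight(dice_values, required_length):
--     """Set-based straight scoring: no sort, no windowed index scan."""
--     if required_length == 4:
--         score = 30
--     elif required_length == 5:
--         score = 40
--     else:
--         return 0
--     values = set(dice_values)
--     if any(all(v + k in values for k in range(required_length)) for v in values):
--         return score
--     return 0
-- ===== Notes on version B (the rewrite author's own statement) =====
-- stated objective: alternative
-- what changed: Replaces sort-then-windowed-index-scan over the sorted unique dice with a set-membership run check: a straight exists iff some value v in the set has v, v+1, ..., v+required_length-1 all present; the 30/40 score is gated on required_length alone.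
import Mathlib
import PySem

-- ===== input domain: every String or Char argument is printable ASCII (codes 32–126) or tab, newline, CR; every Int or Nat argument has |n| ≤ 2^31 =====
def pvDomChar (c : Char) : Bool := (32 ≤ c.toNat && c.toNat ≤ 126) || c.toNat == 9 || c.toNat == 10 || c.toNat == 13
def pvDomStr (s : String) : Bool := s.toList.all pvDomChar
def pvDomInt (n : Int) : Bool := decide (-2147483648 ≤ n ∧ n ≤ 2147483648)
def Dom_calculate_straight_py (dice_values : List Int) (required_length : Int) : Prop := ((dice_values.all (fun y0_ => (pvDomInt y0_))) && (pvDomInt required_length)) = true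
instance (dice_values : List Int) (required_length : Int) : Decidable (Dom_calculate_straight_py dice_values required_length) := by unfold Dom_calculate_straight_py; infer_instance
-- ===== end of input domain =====

-- B replaces A's sort + windowed index scan with a set-membership run check (alternative algorithm, same cost class on dice hands).

-- ===== PORT A =====
-- inner 'for j' loop with flag+break = all over range(required_length-1); indices reached are always in range, so pyGetD is exact here
def aWindow (u : List Int) (rl i : Int) : Bool :=
  (PySem.List.pyRange 0 (rl - 1) 1).all
    (fun j => PySem.List.pyGetD u (i + j + 1) 0 - PySem.List.pyGetD u (i + j) 0 == 1)

-- outer 'for i' loop with early returns; falls through to the next i when rl ∉ {4,5}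
def aLoop (u : List Int) (rl : Int) : List Int → Int
  | [] => 0
  | i :: rest =>
    if aWindow u rl i then
      if rl = 4 then 30
      else if rl = 5 then 40
      else aLoop u rl rest
    else aLoop u rl rest

def calculate_straight_py (dice_values : List Int) (required_length : Int) : Int :=
  let unique_dice := PySem.List.sorted (PySem.Set.ofList dice_values) (fun x => x) false
  if (unique_dice.length : Int) < required_length then 0
  else aLoop unique_dice required_length
    (PySem.List.pyRange 0 ((unique_dice.length : Int) - required_length + 1) 1)

-- ===== PORT B =====
-- any(all(v + k in values for k in range(required_length)) for v in values)
def altHasRun (s : List Int) (rl : Int) : Bool :=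
  s.any (fun v => (PySem.List.pyRange 0 rl 1).all (fun k => s.contains (v + k)))

def calculate_straight_py_alt (dice_values : List Int) (required_length : Int) : Int :=
  if required_length = 4 ∨ required_length = 5 then
    let score : Int := if required_length = 4 then 30 else 40
    let values := PySem.Set.ofList dice_values
    if altHasRun values required_length then score else 0
  else 0

-- ===== PRECONDITION & SPEC =====
def Spec_calculate_straight_py (dice_values : List Int) (required_length : Int) (out : Int) : Prop := out = calculate_straight_py_alt dice_values required_length
instance (dice_values : List Int) (required_length : Int) (out : Int) : Decidable (Spec_calculate_straight_py dice_values required_length out) := by unfold Spec_calculate_straight_py; infer_instance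

-- ===== CLAIM (what is proved, stated in full; the proofs are below) =====
def Claim_equal_calculate_straight_py : Prop := ∀ (dice_values : List Int) (required_length : Int), Dom_calculate_straight_py dice_values required_length → Spec_calculate_straight_py dice_values required_length (calculate_straight_py dice_values required_length)

-- ===== LEMMAS AND PROOFS =====

-- when required_length is neither 4 nor 5 A's loop never returns a score
lemma aLoop_eq_zero (u : List Int) (rl : Int) (h4 : rl ≠ 4) (h5 : rl ≠ 5) :
    ∀ is, aLoop u rl is = 0 := by
  intro is
  induction is with
  | nil => rfl
  | cons i rest ih => simp [aLoop, h4, h5, ih]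

-- A's loop with early return = does any window qualify
lemma aLoop_eq_any (u : List Int) (rl score : Int)
    (h : (rl = 4 ∧ score = 30) ∨ (rl = 5 ∧ score = 40)) :
    ∀ is, aLoop u rl is = if is.any (aWindow u rl) then score else 0 := by
  intro is
  induction is with
  | nil => rfl
  | cons i rest ih =>
    rcases h with ⟨h1, h2⟩ | ⟨h1, h2⟩ <;> subst h1 <;> subst h2
    · by_cases hw : aWindow u 4 i = true <;> simp [aLoop, hw, ih]
    · by_cases hw : aWindow u 5 i = true <;> simp [aLoop, hw, ih]

lemma getD_lt_getD (u : List Int) (hu : u.Pairwise (· < ·)) {a b : Nat}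
    (hab : a < b) (hb : b < u.length) :
    u.getD a 0 < u.getD b 0 := by
  rw [List.getD_eq_getElem u 0 (Nat.lt_trans hab hb), List.getD_eq_getElem u 0 hb]
  exact List.pairwise_iff_getElem.mp hu a b (Nat.lt_trans hab hb) hb hab

-- in a strictly increasing list, the successor value sits at the next index
lemma succ_at_next (u : List Int) (hu : u.Pairwise (· < ·)) {i : Nat}
    (hi : i < u.length) (hmem : u.getD i 0 + 1 ∈ u) :
    i + 1 < u.length ∧ u.getD (i + 1) 0 = u.getD i 0 + 1 := by
  obtain ⟨k, hk, hke⟩ := List.mem_iff_getElem.mp hmem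
  have hke' : u.getD k 0 = u.getD i 0 + 1 := by rw [List.getD_eq_getElem u 0 hk]; exact hke
  have hik : i < k := by
    by_contra h
    rcases Nat.lt_or_ge k i with hki | hki
    · have := getD_lt_getD u hu hki hi; omega
    · have : k = i := by omega
      subst this; omega
  have hk1 : k = i + 1 := by
    by_contra h
    have h2 : i + 1 < k := by omega
    have l1 := getD_lt_getD u hu (by omega : i < i + 1) (by omega : i + 1 < u.length)
    have l2 := getD_lt_getD u hu h2 hk
    omega
  subst hk1
  exact ⟨hk, hke'⟩

-- a window of unit gaps forces arithmetic progression values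
lemma window_chain (u : List Int) (i r : Nat)
    (hw : ∀ j : Nat, j < r - 1 → u.getD (i + j + 1) 0 = u.getD (i + j) 0 + 1) :
    ∀ k : Nat, k < r → u.getD (i + k) 0 = u.getD i 0 + k := by
  intro k
  induction k with
  | zero => intro _; simp
  | succ k ih =>
    intro hk
    have h1 := ih (by omega)
    have h2 := hw k (by omega)
    have : i + k + 1 = i + (k + 1) := by omega
    rw [this] at h2
    rw [h2, h1]; push_cast; omega

-- conversely, r consecutive values present in a strictly increasing list occupy consecutive indices
lemma chain_index (u : List Int) (hu : u.Pairwise (· < ·)) {i : Nat} (hi : i < u.length) (r : Nat)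
    (hc : ∀ k : Nat, k < r → u.getD i 0 + (k : Int) ∈ u) :
    ∀ k : Nat, k < r → i + k < u.length ∧ u.getD (i + k) 0 = u.getD i 0 + k := by
  intro k
  induction k with
  | zero => intro _; simpa using hi
  | succ k ih =>
    intro hk
    obtain ⟨hlen, hval⟩ := ih (by omega)
    have hmem : u.getD (i + k) 0 + 1 ∈ u := by
      have h := hc (k + 1) hk
      rw [hval]
      have e : u.getD i 0 + ((k + 1 : Nat) : Int) = u.getD i 0 + (k : Int) + 1 := by
        push_cast; ring
      rwa [e] at h
    obtain ⟨hlen', hval'⟩ := succ_at_next u hu hlen hmem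
    refine ⟨by omega, ?_⟩
    have : i + k + 1 = i + (k + 1) := by omega
    rw [this] at hlen' hval'
    rw [hval', hval]; push_cast; omega

-- the central equivalence: a unit-gap window of length r exists iff some value starts a run of r present values
lemma window_iff_chain (u : List Int) (hu : u.Pairwise (· < ·)) (r : Nat) (hr : 1 ≤ r) :
    (∃ i : Nat, i + r ≤ u.length ∧ ∀ j : Nat, j < r - 1 →
        u.getD (i + j + 1) 0 = u.getD (i + j) 0 + 1) ↔
    (∃ v ∈ u, ∀ k : Nat, k < r → v + (k : Int) ∈ u) := by
  constructor
  · rintro ⟨i, hlen, hw⟩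
    have hi : i < u.length := by omega
    refine ⟨u.getD i 0, by rw [List.getD_eq_getElem u 0 hi]; exact List.getElem_mem hi, ?_⟩
    intro k hk
    have := window_chain u i r hw k hk
    rw [← this, List.getD_eq_getElem u 0 (by omega : i + k < u.length)]
    exact List.getElem_mem _
  · rintro ⟨v, hv, hc⟩
    obtain ⟨i, hi, hie⟩ := List.mem_iff_getElem.mp hv
    have hie' : u.getD i 0 = v := by rw [List.getD_eq_getElem u 0 hi]; exact hie
    have hc' : ∀ k : Nat, k < r → u.getD i 0 + (k : Int) ∈ u := by
      intro k hk; rw [hie']; exact hc k hk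
    have hall := chain_index u hu hi r hc'
    have hlast := hall (r - 1) (by omega)
    refine ⟨i, by omega, ?_⟩
    intro j hj
    obtain ⟨h1, e1⟩ := hall j (by omega)
    obtain ⟨h2, e2⟩ := hall (j + 1) (by omega)
    have : i + (j + 1) = i + j + 1 := by omega
    rw [this] at e2
    rw [e2, e1]; push_cast; omega

-- Bool-level reading of A's any-window test (r = required_length as a Nat)
lemma anyA_iff (u : List Int) (r : Nat) (hr : 1 ≤ r) :
    ((PySem.List.pyRange 0 ((u.length : Int) - r + 1) 1).any (aWindow u r) = true) ↔
    (∃ i : Nat, i + r ≤ u.length ∧ ∀ j : Nat, j < r - 1 →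
        u.getD (i + j + 1) 0 = u.getD (i + j) 0 + 1) := by
  rw [List.any_eq_true]
  constructor
  · rintro ⟨i, hmem, hwin⟩
    rw [PySem.List.mem_pyRange_one] at hmem
    obtain ⟨h0, hlt⟩ := hmem
    refine ⟨i.toNat, by omega, ?_⟩
    intro j hj
    rw [aWindow, List.all_eq_true] at hwin
    have hjmem : (j : Int) ∈ PySem.List.pyRange 0 ((r : Int) - 1) 1 := by
      rw [PySem.List.mem_pyRange_one]; omega
    have := hwin _ hjmem
    have e1 : i + (j : Int) + 1 = ((i.toNat + j + 1 : Nat) : Int) := by omega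
    have e2 : i + (j : Int) = ((i.toNat + j : Nat) : Int) := by omega
    rw [e1, e2, PySem.List.pyGetD_natCast, PySem.List.pyGetD_natCast] at this
    simp only [beq_iff_eq] at this
    omega
  · rintro ⟨i, hlen, hw⟩
    refine ⟨(i : Int), ?_, ?_⟩
    · rw [PySem.List.mem_pyRange_one]; omega
    · rw [aWindow, List.all_eq_true]
      intro j hj
      rw [PySem.List.mem_pyRange_one] at hj
      obtain ⟨h0, hlt⟩ := hj
      have := hw j.toNat (by omega)
      have e1 : (i : Int) + j + 1 = ((i + j.toNat + 1 : Nat) : Int) := by omega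
      have e2 : (i : Int) + j = ((i + j.toNat : Nat) : Int) := by omega
      rw [e1, e2, PySem.List.pyGetD_natCast, PySem.List.pyGetD_natCast]
      simp only [beq_iff_eq]
      omega

-- Bool-level reading of B's run test
lemma altHasRun_iff (s : List Int) (r : Nat) :
    (altHasRun s r = true) ↔ (∃ v ∈ s, ∀ k : Nat, k < r → v + (k : Int) ∈ s) := by
  rw [altHasRun, List.any_eq_true]
  constructor
  · rintro ⟨v, hv, hall⟩
    refine ⟨v, hv, ?_⟩
    intro k hk
    rw [List.all_eq_true] at hall
    have hkmem : (k : Int) ∈ PySem.List.pyRange 0 (r : Int) 1 := by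
      rw [PySem.List.mem_pyRange_one]; omega
    have := hall _ hkmem
    simpa using this
  · rintro ⟨v, hv, hc⟩
    refine ⟨v, hv, ?_⟩
    rw [List.all_eq_true]
    intro k hk
    rw [PySem.List.mem_pyRange_one] at hk
    obtain ⟨h0, hlt⟩ := hk
    have := hc k.toNat (by omega)
    have e : v + k = v + ((k.toNat : Nat) : Int) := by omega
    rw [e]
    simpa using this

-- the core agreement for required_length ∈ {4, 5}
lemma main_score (dice_values : List Int) (r : Nat) (hr : 1 ≤ r) (score : Int)
    (h : ((r : Int) = 4 ∧ score = 30) ∨ ((r : Int) = 5 ∧ score = 40)) :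
    calculate_straight_py dice_values r =
      (if altHasRun (PySem.Set.ofList dice_values) r then score else 0) := by
  rw [calculate_straight_py]
  set s := PySem.Set.ofList dice_values with hs
  set u := PySem.List.sorted s (fun x => x) false with hu
  have hpw : u.Pairwise (· < ·) := PySem.List.sorted_ofList_pairwise_lt dice_values
  have hmem : ∀ x : Int, x ∈ u ↔ x ∈ s := by
    intro x; rw [hu]; exact PySem.List.mem_sorted s (fun x => x) false x
  have hchain_iff : (altHasRun s r = true) ↔
      (∃ v ∈ u, ∀ k : Nat, k < r → v + (k : Int) ∈ u) := by
    rw [altHasRun_iff s r]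
    constructor
    · rintro ⟨v, hv, hc⟩
      exact ⟨v, (hmem v).mpr hv, fun k hk => (hmem _).mpr (hc k hk)⟩
    · rintro ⟨v, hv, hc⟩
      exact ⟨v, (hmem v).mp hv, fun k hk => (hmem _).mp (hc k hk)⟩
  by_cases hlen : (u.length : Int) < (r : Int)
  · rw [if_pos hlen]
    have : altHasRun s r = false := by
      by_contra hcon
      have htrue : altHasRun s r = true := by
        cases hx : altHasRun s r
        · exact absurd hx hcon
        · rfl
      obtain ⟨v, hv, hc⟩ := hchain_iff.mp htrue
      have := (window_iff_chain u hpw r hr).mpr ⟨v, hv, hc⟩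
      obtain ⟨i, hi, _⟩ := this
      omega
    rw [this]; simp
  · rw [if_neg hlen]
    rw [aLoop_eq_any u r score h]
    by_cases hany : altHasRun s r = true
    · have hw := (window_iff_chain u hpw r hr).mpr (hchain_iff.mp hany)
      rw [if_pos ((anyA_iff u r hr).mpr hw), if_pos hany]
    · have hfalse : altHasRun s r = false := by
        cases hx : altHasRun s r
        · rfl
        · exact absurd hx hany
      have : ¬ (PySem.List.pyRange 0 ((u.length : Int) - r + 1) 1).any (aWindow u r) = true := by
        intro hcon
        exact hany (hchain_iff.mpr ((window_iff_chain u hpw r hr).mp ((anyA_iff u r hr).mp hcon)))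
      rw [if_neg this, hfalse]; simp

-- ===== VERDICT (by name: the statement is the Claim_ definition above) =====
theorem calculate_straight_py_spec : Claim_equal_calculate_straight_py := by
  intro dice_values rl _
  unfold Spec_calculate_straight_py calculate_straight_py_alt
  by_cases h4 : rl = 4
  · subst h4
    have := main_score dice_values 4 (by norm_num) 30 (Or.inl ⟨by norm_num, rfl⟩)
    simpa using this
  · by_cases h5 : rl = 5
    · subst h5
      simp only [if_neg (by norm_num : (5:Int) ≠ 4)]
      have := main_score dice_values 5 (by norm_num) 40 (Or.inr ⟨by norm_num, rfl⟩)
      simpa using this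
    · rw [if_neg (by tauto)]
      rw [calculate_straight_py]
      split
      · rfl
      · exact aLoop_eq_zero _ rl h4 h5 _
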